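-- pv_equiv track=rewrite | github.com/MariiaNikitash/Data-Structures-w-Python | CodePath_TIP102/stacks_queues/advanced1.py | arrange_attendees_by_priority
-- ===== SOURCE A (Python) =====
-- def arrange_attendees_by_priority(attendees, priority):
--    less = []
--    equal = []
--    greater = []
--    for a in attendees:
--       if a < priority:
--          less.append(a)
--       elif a > priority:
--          greater.append(a)
--       else:
--          equal.append(a)
--    return less + equal + greater
-- ===== SOURCE B (Python) =====
-- def arrange_attendees_by_priority(attendees, priority):
--     return sorted(attendees, key=lambda a: 0 if a < priority else (2 if a > priority else 1))
-- ===== Notes on version B (the rewrite author's own statement) =====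
-- stated objective: alternative
-- what changed: Replaces the explicit three-bucket partition loop with a single stable sort on a 3-valued key (0 for less, 1 for equal, 2 for greater); stability preserves original order within each group.
import Mathlib
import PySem

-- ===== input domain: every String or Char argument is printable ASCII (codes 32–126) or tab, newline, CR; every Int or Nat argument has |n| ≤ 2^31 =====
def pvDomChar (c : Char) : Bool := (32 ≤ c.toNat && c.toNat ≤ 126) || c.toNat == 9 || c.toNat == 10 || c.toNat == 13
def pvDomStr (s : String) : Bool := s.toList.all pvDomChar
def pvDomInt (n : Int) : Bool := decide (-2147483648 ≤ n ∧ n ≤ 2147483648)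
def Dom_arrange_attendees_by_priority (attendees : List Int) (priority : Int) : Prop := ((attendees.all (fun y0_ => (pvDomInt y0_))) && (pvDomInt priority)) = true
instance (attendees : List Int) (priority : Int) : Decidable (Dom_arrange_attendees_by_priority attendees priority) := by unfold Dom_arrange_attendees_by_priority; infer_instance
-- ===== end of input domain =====

-- B replaces A's three-bucket partition loop with one stable sort on a 3-valued key (alternative decomposition, not claimed faster).

-- ===== PORT A =====
def arrange_attendees_by_priority (attendees : List Int) (priority : Int) : List Int :=
  let st := attendees.foldl
    (fun (s : List Int × List Int × List Int) a =>
      if a < priority then (s.1 ++ [a], s.2.1, s.2.2)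
      else if a > priority then (s.1, s.2.1, s.2.2 ++ [a])
      else (s.1, s.2.1 ++ [a], s.2.2))
    ([], [], [])
  st.1 ++ st.2.1 ++ st.2.2

-- ===== PORT B =====
def arrange_attendees_by_priority_alt (attendees : List Int) (priority : Int) : List Int :=
  PySem.List.sorted attendees (fun a => if a < priority then (0 : Int) else if a > priority then 2 else 1)

-- ===== PRECONDITION & SPEC =====
def Spec_arrange_attendees_by_priority (attendees : List Int) (priority : Int) (out : List Int) : Prop := out = arrange_attendees_by_priority_alt attendees priority
instance (attendees : List Int) (priority : Int) (out : List Int) : Decidable (Spec_arrange_attendees_by_priority attendees priority out) := by unfold Spec_arrange_attendees_by_priority; infer_instance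

-- ===== CLAIM (what is proved, stated in full; the proofs are below) =====
def Claim_equal_arrange_attendees_by_priority : Prop := ∀ (attendees : List Int) (priority : Int), Dom_arrange_attendees_by_priority attendees priority → Spec_arrange_attendees_by_priority attendees priority (arrange_attendees_by_priority attendees priority)

-- ===== LEMMAS AND PROOFS =====

-- the 3-valued key used by B
def pvKey (priority a : Int) : Int := if a < priority then 0 else if a > priority then 2 else 1

theorem insertBy_split {α : Type} (before : α → α → Bool) (x : α) (ys zs : List α)
    (h1 : ∀ y ∈ ys, before x y = false) (h2 : ∀ z ∈ zs, before x z = true) :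
    PySem.List.insertBy before x (ys ++ zs) = ys ++ x :: zs := by
  induction ys with
  | nil =>
    cases zs with
    | nil => simp [PySem.List.insertBy]
    | cons z zs' => simp [PySem.List.insertBy, h2 z (by simp)]
  | cons y ys' ih =>
    simp only [List.cons_append, PySem.List.insertBy, h1 y (by simp)]
    simp only [Bool.false_eq_true, if_false]
    rw [ih (fun y hy => h1 y (by simp [hy])) ]

theorem foldA_eq (priority : Int) (xs l e g : List Int) :
    xs.foldl (fun (s : List Int × List Int × List Int) a =>
      if a < priority then (s.1 ++ [a], s.2.1, s.2.2)
      else if a > priority then (s.1, s.2.1, s.2.2 ++ [a])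
      else (s.1, s.2.1 ++ [a], s.2.2)) (l, e, g)
    = (l ++ xs.filter (fun a => decide (a < priority)),
       e ++ xs.filter (fun a => pvKey priority a == 1),
       g ++ xs.filter (fun a => decide (a > priority))) := by
  induction xs generalizing l e g with
  | nil => simp
  | cons a xs ih =>
    simp only [List.foldl_cons, List.filter_cons]
    by_cases h1 : a < priority
    · simp [ih, pvKey, h1, List.append_assoc]; omega
    · by_cases h2 : a > priority
      · simp [ih, pvKey, h1, h2, List.append_assoc]
      · simp [ih, pvKey, h1, h2, List.append_assoc]

theorem foldB_eq (priority : Int) (xs L0 L1 L2 : List Int)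
    (h0 : ∀ a ∈ L0, pvKey priority a = 0) (h1 : ∀ a ∈ L1, pvKey priority a = 1)
    (h2 : ∀ a ∈ L2, pvKey priority a = 2) :
    xs.foldl (fun acc x =>
        PySem.List.insertBy (fun a b => decide (pvKey priority a < pvKey priority b)) x acc)
      (L0 ++ L1 ++ L2)
    = (L0 ++ xs.filter (fun a => pvKey priority a == 0))
      ++ (L1 ++ xs.filter (fun a => pvKey priority a == 1))
      ++ (L2 ++ xs.filter (fun a => pvKey priority a == 2)) := by
  induction xs generalizing L0 L1 L2 with
  | nil => simp
  | cons a xs ih =>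
    have hk : pvKey priority a = 0 ∨ pvKey priority a = 1 ∨ pvKey priority a = 2 := by
      unfold pvKey; split_ifs <;> simp
    simp only [List.foldl_cons, List.filter_cons]
    rcases hk with hk | hk | hk
    · rw [List.append_assoc,
        insertBy_split _ a L0 (L1 ++ L2)
          (by intro y hy; simp [h0 y hy, hk])
          (by intro z hz; rcases List.mem_append.mp hz with hz | hz
              · simp [h1 z hz, hk]
              · simp [h2 z hz, hk])]
      have : L0 ++ a :: (L1 ++ L2) = (L0 ++ [a]) ++ L1 ++ L2 := by simp
      rw [this, ih (L0 ++ [a]) L1 L2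
            (by intro y hy; rcases List.mem_append.mp hy with hy | hy
                · exact h0 y hy
                · simp at hy; subst hy; exact hk) h1 h2]
      simp [hk]
    · rw [insertBy_split _ a (L0 ++ L1) L2
          (by intro y hy; rcases List.mem_append.mp hy with hy | hy
              · simp [h0 y hy, hk]
              · simp [h1 y hy, hk])
          (by intro z hz; simp [h2 z hz, hk])]
      have : (L0 ++ L1) ++ a :: L2 = L0 ++ (L1 ++ [a]) ++ L2 := by simp
      rw [this, ih L0 (L1 ++ [a]) L2 h0
            (by intro y hy; rcases List.mem_append.mp hy with hy | hy
                · exact h1 y hy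
                · simp at hy; subst hy; exact hk) h2]
      simp [hk]
    · rw [PySem.List.insertBy_of_forall_not_before _ a _
          (by intro y hy
              rcases List.mem_append.mp hy with hy | hy
              · rcases List.mem_append.mp hy with hy | hy
                · simp [h0 y hy, hk]
                · simp [h1 y hy, hk]
              · simp [h2 y hy, hk])]
      have : (L0 ++ L1 ++ L2) ++ [a] = L0 ++ L1 ++ (L2 ++ [a]) := by simp
      rw [this, ih L0 L1 (L2 ++ [a]) h0 h1
            (by intro y hy; rcases List.mem_append.mp hy with hy | hy
                · exact h2 y hy
                · simp at hy; subst hy; exact hk)]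
      simp [hk]

theorem key_filters (priority : Int) :
    (fun a => pvKey priority a == 0) = (fun a : Int => decide (a < priority))
    ∧ (fun a => pvKey priority a == 2) = (fun a : Int => decide (a > priority)) := by
  constructor <;> funext a <;> unfold pvKey <;> split_ifs <;> simp <;> omega

-- ===== VERDICT (by name: the statement is the Claim_ definition above) =====
theorem arrange_attendees_by_priority_spec : Claim_equal_arrange_attendees_by_priority := by
  intro attendees priority _
  unfold Spec_arrange_attendees_by_priority arrange_attendees_by_priority
    arrange_attendees_by_priority_alt
  rw [show (fun a : Int => if a < priority then (0 : Int) else if a > priority then 2 else 1)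
        = pvKey priority from rfl]
  rw [PySem.List.sorted_eq_foldl_insertBy]
  have hB := foldB_eq priority attendees [] [] [] (by simp) (by simp) (by simp)
  simp only [List.nil_append, List.append_nil] at hB
  rw [hB, foldA_eq]
  simp [(key_filters priority).1, (key_filters priority).2]
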